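-- pv_equiv track=rewrite | github.com/olivercalder/sonic-signatures | Preprocessing/counts.py | nest_dict_by_play
-- ===== SOURCE A (Python) =====
-- def nest_dict_by_play(counts_dict):
--     counts_dict_nested = {}
--     for char in counts_dict:
--         play = char.split('_')[0]
--         if play not in counts_dict_nested:
--             counts_dict_nested[play] = {}
--         counts_dict_nested[play][char] = counts_dict[char]
--     return counts_dict_nested
-- ===== SOURCE B (Python) =====
-- def nest_dict_by_play(counts_dict):
--     groups = {}
--     for char in counts_dict:
--         groups.setdefault(char.split('_')[0], []).append(char)
--     return {play: {char: counts_dict[char] for char in chars}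
--             for play, chars in groups.items()}
-- ===== Notes on version B (the rewrite author's own statement) =====
-- stated objective: alternative
-- what changed: B separates grouping from construction: one pass collects the key list of each play prefix (dict of lists via setdefault), then a comprehension turns each key list into the inner dict, instead of A's single pass that creates and updates nested dicts in place with membership checks.
import Mathlib
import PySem

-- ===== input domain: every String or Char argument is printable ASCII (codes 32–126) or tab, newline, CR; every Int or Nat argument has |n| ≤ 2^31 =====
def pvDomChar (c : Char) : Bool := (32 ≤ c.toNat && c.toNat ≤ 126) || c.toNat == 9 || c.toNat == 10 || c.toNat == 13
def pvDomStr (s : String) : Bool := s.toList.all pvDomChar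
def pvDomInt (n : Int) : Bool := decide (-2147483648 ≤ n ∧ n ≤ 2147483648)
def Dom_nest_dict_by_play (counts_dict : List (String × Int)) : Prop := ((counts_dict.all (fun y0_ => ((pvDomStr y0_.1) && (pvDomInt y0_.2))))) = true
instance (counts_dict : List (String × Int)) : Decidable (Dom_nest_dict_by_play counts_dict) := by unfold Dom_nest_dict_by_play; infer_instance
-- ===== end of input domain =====

-- B separates grouping from construction: one pass collects each play's key list, then each
-- key list is turned into the inner dict, instead of A's incremental nested-dict accumulation.

-- char.split('_')[0]; split('_') is always nonempty, so the [0] never raises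
def pvPlay (s : String) : String :=
  (PySem.List.pyGet? ((PySem.Str.split? s "_").getD []) 0).getD ""

-- counts_dict[char]: first-match lookup in the association list; char is always a key, so the default never fires
def pvVal (counts_dict : List (String × Int)) (k : String) : Int :=
  (PySem.Dict.mk counts_dict).getD k 0

-- ===== PORT A =====
def nest_dict_by_play (counts_dict : List (String × Int)) : List (String × List (String × Int)) :=
  (counts_dict.foldl
    (fun (nested : PySem.Dict String (PySem.Dict String Int)) kv =>
      let play := pvPlay kv.1
      let nested := if nested.contains play then nested else nested.insert play PySem.Dict.empty
      nested.insert play ((nested.getD play PySem.Dict.empty).insert kv.1 (pvVal counts_dict kv.1)))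
    PySem.Dict.empty).items.map (fun p => (p.1, p.2.items))

-- ===== PORT B =====
def nest_dict_by_play_alt (counts_dict : List (String × Int)) : List (String × List (String × Int)) :=
  -- groups.setdefault(play, []).append(char)  =  modify play [] (· ++ [char])
  let groups : PySem.Dict String (List String) :=
    counts_dict.foldl (fun g kv => g.modify (pvPlay kv.1) [] (· ++ [kv.1])) PySem.Dict.empty
  -- the outer comprehension runs over groups.items; its keys are distinct, so its items are this map
  groups.items.map (fun pr =>
    (pr.1,
      (pr.2.foldl (fun (inner : PySem.Dict String Int) c => inner.insert c (pvVal counts_dict c))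
        PySem.Dict.empty).items))

-- ===== PRECONDITION & SPEC =====
def Spec_nest_dict_by_play (counts_dict : List (String × Int)) (out : List (String × List (String × Int))) : Prop := out = nest_dict_by_play_alt counts_dict
instance (counts_dict : List (String × Int)) (out : List (String × List (String × Int))) : Decidable (Spec_nest_dict_by_play counts_dict out) := by unfold Spec_nest_dict_by_play; infer_instance

-- ===== CLAIM (what is proved, stated in full; the proofs are below) =====
def Claim_equal_nest_dict_by_play : Prop := ∀ (counts_dict : List (String × Int)), Dom_nest_dict_by_play counts_dict → Spec_nest_dict_by_play counts_dict (nest_dict_by_play counts_dict)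

-- ===== LEMMAS AND PROOFS =====

-- A's loop body
def pvF (cd : List (String × Int)) (nested : PySem.Dict String (PySem.Dict String Int))
    (kv : String × Int) : PySem.Dict String (PySem.Dict String Int) :=
  let play := pvPlay kv.1
  let nested := if nested.contains play then nested else nested.insert play PySem.Dict.empty
  nested.insert play ((nested.getD play PySem.Dict.empty).insert kv.1 (pvVal cd kv.1))

-- B's inner dict for one play, over an arbitrary key list l
def pvGroup (cd l : List (String × Int)) (p : String) : PySem.Dict String Int :=
  (l.filter (fun kv => pvPlay kv.1 == p)).foldl
    (fun inner kv => inner.insert kv.1 (pvVal cd kv.1)) PySem.Dict.empty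

lemma pvF_eq (cd : List (String × Int)) (d : PySem.Dict String (PySem.Dict String Int))
    (kv : String × Int) :
    pvF cd d kv = d.insert (pvPlay kv.1)
      ((d.getD (pvPlay kv.1) PySem.Dict.empty).insert kv.1 (pvVal cd kv.1)) := by
  unfold pvF
  by_cases h : d.contains (pvPlay kv.1) = true
  · simp [h]
  · simp only [h, Bool.false_eq_true, if_false]
    rw [PySem.Dict.getD_insert_self, PySem.Dict.insert_insert_self,
        PySem.Dict.getD_of_not_contains d PySem.Dict.empty (by simpa using h)]

lemma pvGroup_append (cd l : List (String × Int)) (kv : String × Int) (q : String) :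
    pvGroup cd (l ++ [kv]) q =
      if pvPlay kv.1 == q then (pvGroup cd l q).insert kv.1 (pvVal cd kv.1)
      else pvGroup cd l q := by
  unfold pvGroup
  rw [List.filter_append, List.foldl_append]
  by_cases h : pvPlay kv.1 == q
  · simp [h]
  · simp [h]

lemma pvMain (cd l : List (String × Int)) :
    l.foldl (pvF cd) PySem.Dict.empty =
      PySem.Dict.mk ((PySem.Set.ofList (l.map (fun kv => pvPlay kv.1))).map
        (fun p => (p, pvGroup cd l p))) := by
  induction l using List.reverseRecOn with
  | nil => rfl
  | append_singleton l kv ih =>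
    rw [List.foldl_append, List.foldl_cons, List.foldl_nil, ih, pvF_eq]
    rw [List.map_append, List.map_cons, List.map_nil, PySem.Set.ofList_append_singleton]
    by_cases hp : pvPlay kv.1 ∈ PySem.Set.ofList (l.map (fun kv => pvPlay kv.1))
    · rw [PySem.Set.add_of_mem hp]
      have hnd : (PySem.Dict.mk ((PySem.Set.ofList (l.map (fun kv => pvPlay kv.1))).map
          (fun p => (p, pvGroup cd l p)))).keys.Nodup := by
        simp [PySem.Dict.keys, List.map_map, Function.comp_def, PySem.Set.nodup_ofList]
      have hmem : (pvPlay kv.1, pvGroup cd l (pvPlay kv.1)) ∈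
          (PySem.Dict.mk ((PySem.Set.ofList (l.map (fun kv => pvPlay kv.1))).map
            (fun p => (p, pvGroup cd l p)))).items :=
        List.mem_map.mpr ⟨pvPlay kv.1, hp, rfl⟩
      rw [PySem.Dict.getD_of_mem_items _ hmem hnd]
      have hc : (PySem.Dict.mk ((PySem.Set.ofList (l.map (fun kv => pvPlay kv.1))).map
          (fun p => (p, pvGroup cd l p)))).contains (pvPlay kv.1) = true := by
        rw [PySem.Dict.contains_eq_decide_mem_keys]
        simp only [PySem.Dict.keys, List.map_map]
        simpa [Function.comp] using hp
      apply PySem.Dict.ext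
      rw [PySem.Dict.items_insert_of_contains _ _ hc]
      show ((PySem.Set.ofList (l.map (fun kv => pvPlay kv.1))).map
          (fun p => (p, pvGroup cd l p))).map _ = _
      rw [List.map_map]
      apply List.map_congr_left
      intro q _
      by_cases hq : q = pvPlay kv.1
      · subst hq; simp [pvGroup_append]
      · have h1 : (q == pvPlay kv.1) = false := by simpa using hq
        have h2 : (pvPlay kv.1 == q) = false := by
          simpa using fun h => hq h.symm
        simp [pvGroup_append, h2]
        exact fun h => absurd h hq
    · rw [PySem.Set.add_of_not_mem hp]
      have hc : (PySem.Dict.mk ((PySem.Set.ofList (l.map (fun kv => pvPlay kv.1))).map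
          (fun p => (p, pvGroup cd l p)))).contains (pvPlay kv.1) = false := by
        rw [PySem.Dict.contains_eq_decide_mem_keys]
        simp only [PySem.Dict.keys, List.map_map]
        simpa [Function.comp] using hp
      have hgrp : pvGroup cd l (pvPlay kv.1) = PySem.Dict.empty := by
        unfold pvGroup
        have : l.filter (fun kv' => pvPlay kv'.1 == pvPlay kv.1) = [] := by
          rw [List.filter_eq_nil_iff]
          intro a ha hba
          exact hp ((PySem.Set.mem_ofList _ _).mpr (List.mem_map.mpr ⟨a, ha, (by simpa using hba)⟩))
        rw [this]; rfl
      rw [PySem.Dict.getD_of_not_contains _ _ hc]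
      apply PySem.Dict.ext
      rw [PySem.Dict.items_insert_of_not_contains _ _ hc]
      show _ ++ _ = List.map _ (_ ++ [pvPlay kv.1])
      rw [List.map_append, List.map_cons, List.map_nil]
      congr 1
      · apply List.map_congr_left
        intro q hq
        have h1 : (pvPlay kv.1 == q) = false := by
          simpa using fun h => hp (by rw [h]; exact hq)
        simp [pvGroup_append, h1]
      · simp [pvGroup_append, hgrp]

-- the grouping dict built by B's first pass
def pvGroups (cd : List (String × Int)) : PySem.Dict String (List String) :=
  cd.foldl (fun g kv => g.modify (pvPlay kv.1) [] (· ++ [kv.1])) PySem.Dict.empty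

lemma pvGroups_keys (cd : List (String × Int)) :
    (pvGroups cd).keys = PySem.Set.ofList (cd.map (fun kv => pvPlay kv.1)) := by
  unfold pvGroups
  rw [PySem.Dict.keys_foldl_modify_key cd (fun kv => pvPlay kv.1) [] (fun _ kv l => l ++ [kv.1])
        PySem.Dict.empty]
  simp [PySem.Set.update_nil_left]

lemma pvGroups_keys_nodup (cd : List (String × Int)) : (pvGroups cd).keys.Nodup := by
  unfold pvGroups
  exact PySem.Dict.nodup_keys_foldl_modify_key cd (fun kv => pvPlay kv.1) []
    (fun _ kv l => l ++ [kv.1]) PySem.Dict.empty (by simp [PySem.Dict.keys_empty])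

lemma pvGroups_getD (cd : List (String × Int)) (p : String) :
    (pvGroups cd).getD p [] = (cd.filter (fun kv => pvPlay kv.1 == p)).map (·.1) := by
  unfold pvGroups
  have h : cd.foldl (fun g kv => g.modify (pvPlay kv.1) [] (· ++ [kv.1]))
      (PySem.Dict.empty : PySem.Dict String (List String)) =
      (cd.map (fun kv => (pvPlay kv.1, kv.1))).foldl
        (fun d pr => d.modify pr.1 [] (· ++ [pr.2])) PySem.Dict.empty := by
    rw [List.foldl_map]
  rw [h, PySem.Dict.getD_foldl_modify_append, List.filter_map, List.map_map]
  simp [Function.comp_def]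

lemma pvAlt_eq (cd : List (String × Int)) :
    nest_dict_by_play_alt cd =
      (PySem.Set.ofList (cd.map (fun kv => pvPlay kv.1))).map
        (fun p => (p, (pvGroup cd cd p).items)) := by
  show ((pvGroups cd).items.map _) = _
  rw [PySem.Dict.items_eq_map_keys (pvGroups cd) (pvGroups_keys_nodup cd) [], List.map_map,
      pvGroups_keys]
  apply List.map_congr_left
  intro p _
  simp only [Function.comp_def, pvGroups_getD, List.foldl_map]
  rfl

-- ===== VERDICT (by name: the statement is the Claim_ definition above) =====
theorem nest_dict_by_play_spec : Claim_equal_nest_dict_by_play := by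
  intro cd _
  show _ = _
  rw [show nest_dict_by_play cd = (cd.foldl (pvF cd) PySem.Dict.empty).items.map
      (fun p => (p.1, p.2.items)) from rfl]
  rw [pvMain cd cd, pvAlt_eq]
  simp [List.map_map]
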